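-- pv_equiv track=rewrite | github.com/jenellefeather/cochdnn | notebooks/notebook_helpers.py | combined_experiment_response_dictionaries
-- ===== SOURCE A (Python) =====
-- def combined_experiment_response_dictionaries(all_dicts):
--     # all_dicts -- list of dictionaries output from respones_network_by_layer
--     # if a particular model was included in mulitple runs, combine the participant responses
--     combined_experiment_dict = {}
--     for experiment in all_dicts:
--         for model in experiment.keys():
--             if model not in list(combined_experiment_dict.keys()):
--                 combined_experiment_dict[model] = experiment[model]
--             else:
--                 for layer in combined_experiment_dict[model].keys():
--                     combined_experiment_dict[model][layer] = combined_experiment_dict[model][layer] + experiment[model][layer]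
--
--     return combined_experiment_dict
-- ===== SOURCE B (Python) =====
-- def combined_experiment_response_dictionaries(all_dicts):
--     # Index-then-reduce: group each model's per-experiment layer-dicts in order of
--     # first appearance, then fold each group into its first dict (aliased, like A).
--     groups = {}
--     for experiment in all_dicts:
--         for model, layer_dict in experiment.items():
--             groups.setdefault(model, []).append(layer_dict)
--     combined = {}
--     for model, dicts in groups.items():
--         first = dicts[0]
--         for other in dicts[1:]:
--             for layer in first.keys():
--                 first[layer] = first[layer] + other[layer]
--         combined[model] = first
--     return combined
-- ===== Notes on version B (the rewrite author's own statement) =====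
-- stated objective: alternative
-- what changed: Replaces A's single scan with a per-model membership check (rebuilding list(keys()) on every model) by an index-then-reduce shape: one pass groups each model's layer-dicts with setdefault, a second pass folds each group into its first dict; like A, B aliases and mutates the first occurrence's dict (return-value equivalence is what is proved).
import Mathlib
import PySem

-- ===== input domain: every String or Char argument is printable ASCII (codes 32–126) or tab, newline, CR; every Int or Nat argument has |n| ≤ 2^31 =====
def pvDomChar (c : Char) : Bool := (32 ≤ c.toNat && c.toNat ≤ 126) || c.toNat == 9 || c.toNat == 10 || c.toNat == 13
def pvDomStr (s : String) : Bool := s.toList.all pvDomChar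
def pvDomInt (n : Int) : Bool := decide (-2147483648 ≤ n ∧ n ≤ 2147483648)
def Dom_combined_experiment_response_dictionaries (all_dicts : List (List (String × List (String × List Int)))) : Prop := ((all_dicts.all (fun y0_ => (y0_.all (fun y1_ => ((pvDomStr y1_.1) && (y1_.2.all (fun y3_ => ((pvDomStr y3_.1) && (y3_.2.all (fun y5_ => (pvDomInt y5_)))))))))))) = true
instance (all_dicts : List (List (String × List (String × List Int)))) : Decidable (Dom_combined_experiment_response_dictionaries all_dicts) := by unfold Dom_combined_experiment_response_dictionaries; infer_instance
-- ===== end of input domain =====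

-- B replaces A's scan-with-membership-check by an index-then-reduce decomposition (group per
-- model, then fold each group); equivalence is about the RETURN value (both Pythons mutate the
-- first occurrence's inner dicts in place, A and B alike).


-- ===== PORT A =====
-- merging one later layer-dict `other` into the current combined layer-dict `cd`
-- (Python: for layer in combined[model].keys(): combined[model][layer] = … + experiment[model][layer];
--  the `getD … []` is only reached where Python would raise KeyError, which Pre_ excludes)
def pvMergeA (cd : PySem.Dict String (List Int)) (other : List (String × List Int)) :
    PySem.Dict String (List Int) :=
  cd.keys.foldl
    (fun cd layer => cd.insert layer (cd.getD layer [] ++ (PySem.Dict.mk other).getD layer []))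
    cd

def combined_experiment_response_dictionaries (all_dicts : List (List (String × List (String × List Int)))) : List (String × List (String × List Int)) :=
  (all_dicts.foldl
    (fun comb experiment =>
      (PySem.Dict.mk experiment).keys.foldl
        (fun comb model =>
          if model ∉ comb.keys then
            comb.insert model ((PySem.Dict.mk experiment).getD model [])
          else
            comb.insert model
              ((pvMergeA (PySem.Dict.mk (comb.getD model []))
                  ((PySem.Dict.mk experiment).getD model [])).items))
        comb)
    PySem.Dict.empty).items

-- ===== PORT B =====
-- fold one later layer-dict into the first one (Python B's inner `for layer in first.keys()` loop)
def pvFoldInto (first other : List (String × List Int)) : List (String × List Int) :=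
  ((PySem.Dict.mk first).keys.foldl
    (fun f layer => f.insert layer (f.getD layer [] ++ (PySem.Dict.mk other).getD layer []))
    (PySem.Dict.mk first)).items

def combined_experiment_response_dictionaries_alt (all_dicts : List (List (String × List (String × List Int)))) : List (String × List (String × List Int)) :=
  let groups : PySem.Dict String (List (List (String × List Int))) :=
    all_dicts.foldl
      (fun g experiment =>
        experiment.foldl (fun g p => g.modify p.1 [] (· ++ [p.2])) g)
      PySem.Dict.empty
  groups.items.foldl
    (fun comb pr =>
      match pr.2 with
      | [] => comb
      | first :: rest => comb ++ [(pr.1, rest.foldl pvFoldInto first)])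
    []

-- ===== PRECONDITION & SPEC =====
-- Pre_ excludes (a) association lists with duplicate keys at either level — those do not arise
-- from Python dicts (dict construction collapses them), and (b) inputs where a later occurrence
-- of a model lacks a layer present in its first occurrence, on which Python A raises KeyError.
def Pre_combined_experiment_response_dictionaries (all_dicts : List (List (String × List (String × List Int)))) : Prop :=
  (∀ e ∈ all_dicts, (e.map Prod.fst).Nodup ∧ ∀ p ∈ e, (p.2.map Prod.fst).Nodup) ∧
  (∀ p ∈ all_dicts.flatten,
     ∀ q ∈ (PySem.Dict.mk all_dicts.flatten).getD p.1 [], q.1 ∈ p.2.map Prod.fst)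
instance (all_dicts : List (List (String × List (String × List Int)))) : Decidable (Pre_combined_experiment_response_dictionaries all_dicts) := by unfold Pre_combined_experiment_response_dictionaries; infer_instance

def pvWitness_combined_experiment_response_dictionaries : (List (List (String × List (String × List Int)))) :=
  [[("alexnet", [("conv1", [1, 2]), ("fc", [3])]), ("vgg", [("conv1", [9])])],
   [("alexnet", [("conv1", [4]), ("fc", [5]), ("extra", [7])])]]

def Spec_combined_experiment_response_dictionaries (all_dicts : List (List (String × List (String × List Int)))) (out : List (String × List (String × List Int))) : Prop := out = combined_experiment_response_dictionaries_alt all_dicts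
instance (all_dicts : List (List (String × List (String × List Int)))) (out : List (String × List (String × List Int))) : Decidable (Spec_combined_experiment_response_dictionaries all_dicts out) := by unfold Spec_combined_experiment_response_dictionaries; infer_instance

-- ===== CLAIM (what is proved, stated in full; the proofs are below) =====
def Claim_equal_combined_experiment_response_dictionaries : Prop := ∀ (all_dicts : List (List (String × List (String × List Int)))), Dom_combined_experiment_response_dictionaries all_dicts → Pre_combined_experiment_response_dictionaries all_dicts → Spec_combined_experiment_response_dictionaries all_dicts (combined_experiment_response_dictionaries all_dicts)

-- ===== LEMMAS AND PROOFS =====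

-- merging all of a group's later dicts into its first one
def pvMergeAll (dicts : List (List (String × List Int))) : List (String × List Int) :=
  match dicts with
  | [] => []
  | first :: rest => rest.foldl pvFoldInto first

-- the A-side view of a group dictionary: each group collapsed to its merged layer-dict
def pvCollapse (g : PySem.Dict String (List (List (String × List Int)))) :
    PySem.Dict String (List (String × List Int)) :=
  PySem.Dict.mk (g.items.map (fun pr => (pr.1, pvMergeAll pr.2)))

theorem pvMergeA_eq_foldInto (cd other : List (String × List Int)) :
    (pvMergeA (PySem.Dict.mk cd) other).items = pvFoldInto cd other := by
  rfl

theorem pvMergeAll_concat (w : List (List (String × List Int))) (v : List (String × List Int))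
    (hw : w ≠ []) : pvMergeAll (w ++ [v]) = pvFoldInto (pvMergeAll w) v := by
  cases w with
  | nil => exact absurd rfl hw
  | cons a t => simp [pvMergeAll, List.foldl_append]

theorem pvCollapse_keys (g : PySem.Dict String (List (List (String × List Int)))) :
    (pvCollapse g).keys = g.keys := by
  simp [pvCollapse, PySem.Dict.keys, List.map_map, Function.comp]

-- A's per-experiment fold over keys-with-lookup equals the fold over the pairs, given unique keys
theorem pvKeysFold_eq_pairsFold {α : Type}
    (F : α → String → List (String × List Int) → α) :
    ∀ (e : List (String × List (String × List Int))) (c0 : α),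
      (e.map Prod.fst).Nodup →
      ((PySem.Dict.mk e).keys.foldl
          (fun c model => F c model ((PySem.Dict.mk e).getD model [])) c0)
        = e.foldl (fun c p => F c p.1 p.2) c0 := by
  intro e
  induction e with
  | nil => intro c0 _; rfl
  | cons p rest ih =>
    intro c0 h
    obtain ⟨k, v⟩ := p
    have h' : k ∉ rest.map Prod.fst ∧ (rest.map Prod.fst).Nodup := by
      simpa [List.nodup_cons] using h
    have hkeys : (PySem.Dict.mk ((k, v) :: rest)).keys = k :: rest.map Prod.fst := by
      simp [PySem.Dict.keys]
    rw [hkeys]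
    simp only [List.foldl_cons]
    have hhead : (PySem.Dict.mk ((k, v) :: rest)).getD k [] = v := by
      simp [PySem.Dict.getD, PySem.Dict.get?_mk_cons]
    rw [hhead]
    have hcong :
        (rest.map Prod.fst).foldl
            (fun c model => F c model ((PySem.Dict.mk ((k, v) :: rest)).getD model [])) (F c0 k v)
          = (rest.map Prod.fst).foldl
            (fun c model => F c model ((PySem.Dict.mk rest).getD model [])) (F c0 k v) := by
      apply PySem.List.foldl_congr_mem
      intro acc x hx
      have hne : k ≠ x := fun hEq => h'.1 (hEq ▸ hx)
      rw [show (PySem.Dict.mk ((k, v) :: rest)).getD x [] = (PySem.Dict.mk rest).getD x [] by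
        simp [PySem.Dict.getD, PySem.Dict.get?_mk_cons, hne]]
    rw [hcong]
    have := ih (F c0 k v) h'.2
    simpa [PySem.Dict.keys] using this

theorem pvModify_keys_nodup (g : PySem.Dict String (List (List (String × List Int))))
    (k : String) (v : List (String × List Int)) (h : g.keys.Nodup) :
    (g.modify k [] (· ++ [v])).keys.Nodup := by
  rw [PySem.Dict.keys_modify]
  by_cases hc : g.contains k = true
  · rw [PySem.Dict.keys_insert_of_contains _ _ hc]; exact h
  · rw [PySem.Dict.keys_insert_of_not_contains _ _ (by simpa using hc)]
    refine List.Nodup.append h (List.nodup_singleton _) ?_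
    intro a ha hb
    simp at hb
    subst hb
    exact hc ((PySem.Dict.contains_iff_mem_keys _ _).mpr ha)

theorem pvModify_values_ne_nil (g : PySem.Dict String (List (List (String × List Int))))
    (k : String) (v : List (String × List Int))
    (hne : ∀ w ∈ g.values, w ≠ []) :
    ∀ w ∈ (g.modify k [] (· ++ [v])).values, w ≠ [] := by
  intro w hw
  have : w = g.getD k [] ++ [v] ∨ w ∈ g.values := by
    have hmod : g.modify k [] (· ++ [v]) = g.insert k (g.getD k [] ++ [v]) := rfl
    rw [hmod] at hw
    exact PySem.Dict.mem_values_insert g k _ w hw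
  rcases this with h | h
  · subst h; simp
  · exact hne w h

-- one A-step on the collapsed view equals collapsing after one grouping step
theorem pvStep_commute
    (g : PySem.Dict String (List (List (String × List Int)))) (k : String)
    (v : List (String × List Int))
    (_hnd : g.keys.Nodup) (hne : ∀ w ∈ g.values, w ≠ []) :
    (if k ∉ (pvCollapse g).keys then
        (pvCollapse g).insert k v
      else
        (pvCollapse g).insert k
          ((pvMergeA (PySem.Dict.mk ((pvCollapse g).getD k [])) v).items))
      = pvCollapse (g.modify k [] (· ++ [v])) := by
  have hkeys := pvCollapse_keys g
  have hmod : g.modify k [] (· ++ [v]) = g.insert k (g.getD k [] ++ [v]) := rfl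
  by_cases hk : k ∈ g.keys
  · rw [if_neg (by rw [hkeys]; simp [hk])]
    have hcg : g.contains k = true := (PySem.Dict.contains_iff_mem_keys g k).mpr hk
    have hcc : (pvCollapse g).contains k = true := by
      rw [(PySem.Dict.contains_iff_mem_keys _ k), hkeys]; exact hk
    obtain ⟨w, hw⟩ : ∃ w, g.get? k = some w := by
      rw [PySem.Dict.contains_eq_isSome_get?] at hcg
      cases hgw : g.get? k with
      | none => rw [hgw] at hcg; simp at hcg
      | some w => exact ⟨w, rfl⟩
    have hwv : w ∈ g.values := by
      have := PySem.Dict.mem_items_of_get?_eq_some g hw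
      simp only [PySem.Dict.values]
      exact List.mem_map.mpr ⟨(k, w), this, rfl⟩
    have hwne : w ≠ [] := hne w hwv
    obtain ⟨pr, hpr, hpr2⟩ : ∃ pr, List.find? (fun p => p.1 == k) g.items = some pr ∧ pr.2 = w := by
      simp only [PySem.Dict.get?] at hw
      cases hf : List.find? (fun p => p.1 == k) g.items with
      | none => rw [hf] at hw; simp at hw
      | some pr => rw [hf] at hw; exact ⟨pr, rfl, by simpa using hw⟩
    have hgetc : (pvCollapse g).get? k = some (pvMergeAll w) := by
      simp only [pvCollapse, PySem.Dict.get?, List.find?_map]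
      have hpred : ((fun p : String × List (String × List Int) => p.1 == k) ∘
          (fun pr : String × List (List (String × List Int)) => (pr.1, pvMergeAll pr.2)))
          = (fun p : String × List (List (String × List Int)) => p.1 == k) := rfl
      rw [hpred, hpr, ← hpr2]
      rfl
    have hgetDc : (pvCollapse g).getD k [] = pvMergeAll w := by
      simp [PySem.Dict.getD, hgetc]
    have hgetDg : g.getD k [] = w := by simp [PySem.Dict.getD, hw]
    rw [hgetDc, hmod, hgetDg]
    apply PySem.Dict.ext
    rw [PySem.Dict.items_insert_of_contains _ _ hcc]
    have hitems2 : (g.insert k (w ++ [v])).items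
        = List.map (fun p => if (p.1 == k) = true then (k, w ++ [v]) else p) g.items :=
      PySem.Dict.items_insert_of_contains _ _ hcg
    simp only [pvCollapse, hitems2, List.map_map]
    apply List.map_congr_left
    intro q _
    by_cases hq : q.1 = k
    · simp [Function.comp, hq, pvMergeA_eq_foldInto, pvMergeAll_concat w v hwne]
    · simp [Function.comp, hq]
  · rw [if_pos (by rw [hkeys]; simp [hk])]
    have hcg : g.contains k = false := by
      rw [show g.contains k = decide (k ∈ g.keys) from PySem.Dict.contains_eq_decide_mem_keys g k]
      simp [hk]
    have hcc : (pvCollapse g).contains k = false := by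
      rw [show (pvCollapse g).contains k = decide (k ∈ (pvCollapse g).keys) from
        PySem.Dict.contains_eq_decide_mem_keys _ k]
      rw [hkeys]; simp [hk]
    apply PySem.Dict.ext
    rw [PySem.Dict.items_insert_of_not_contains _ _ hcc, hmod,
      PySem.Dict.getD_of_not_contains _ _ hcg]
    have hitems2 : (g.insert k ([] ++ [v])).items = g.items ++ [(k, [] ++ [v])] :=
      PySem.Dict.items_insert_of_not_contains _ _ hcg
    simp only [pvCollapse, hitems2, List.map_append]
    rfl

-- the whole flattened fold commutes with collapsing
theorem pvFold_commute (flat : List (String × List (String × List Int))) :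
    ∀ (g : PySem.Dict String (List (List (String × List Int)))),
      g.keys.Nodup → (∀ w ∈ g.values, w ≠ []) →
      (flat.foldl
          (fun comb p =>
            if p.1 ∉ comb.keys then comb.insert p.1 p.2
            else comb.insert p.1
              ((pvMergeA (PySem.Dict.mk (comb.getD p.1 [])) p.2).items))
          (pvCollapse g))
        = pvCollapse (flat.foldl (fun g p => g.modify p.1 [] (· ++ [p.2])) g) := by
  induction flat with
  | nil => intro g _ _; rfl
  | cons p t ih =>
    intro g hnd hne
    simp only [List.foldl_cons]
    rw [pvStep_commute g p.1 p.2 hnd hne]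
    exact ih _ (pvModify_keys_nodup g p.1 p.2 hnd) (pvModify_values_ne_nil g p.1 p.2 hne)

theorem pvGroups_values_ne_nil (flat : List (String × List (String × List Int))) :
    ∀ (g : PySem.Dict String (List (List (String × List Int)))),
      (∀ w ∈ g.values, w ≠ []) →
      ∀ w ∈ (flat.foldl (fun g p => g.modify p.1 [] (· ++ [p.2])) g).values, w ≠ [] := by
  induction flat with
  | nil => intro g h; exact h
  | cons p t ih =>
    intro g h
    simp only [List.foldl_cons]
    exact ih _ (pvModify_values_ne_nil g p.1 p.2 h)

-- B's final fold builds exactly the collapsed items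
theorem pvFinalFold (l : List (String × List (List (String × List Int)))) :
    ∀ (acc : List (String × List (String × List Int))),
    (∀ pr ∈ l, pr.2 ≠ []) →
    (l.foldl
        (fun comb pr =>
          match pr.2 with
          | [] => comb
          | first :: rest => comb ++ [(pr.1, rest.foldl pvFoldInto first)])
        acc)
      = acc ++ l.map (fun pr => (pr.1, pvMergeAll pr.2)) := by
  induction l with
  | nil => intro acc _; simp
  | cons pr t ih =>
    intro acc h
    simp only [List.foldl_cons, List.map_cons]
    cases hpr : pr.2 with
    | nil => exact absurd hpr (h pr (by simp))
    | cons first rest =>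
      rw [ih _ (fun q hq => h q (by simp [hq]))]
      simp [pvMergeAll]

-- ===== VERDICT (by name: the statement is the Claim_ definition above) =====
theorem combined_experiment_response_dictionaries_spec : Claim_equal_combined_experiment_response_dictionaries := by
  intro all_dicts _ hpre
  obtain ⟨h1, _⟩ := hpre
  show combined_experiment_response_dictionaries all_dicts
      = combined_experiment_response_dictionaries_alt all_dicts
  unfold combined_experiment_response_dictionaries combined_experiment_response_dictionaries_alt
  have hA :
      (all_dicts.foldl
        (fun comb experiment =>
          (PySem.Dict.mk experiment).keys.foldl
            (fun comb model =>
              if model ∉ comb.keys then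
                comb.insert model ((PySem.Dict.mk experiment).getD model [])
              else
                comb.insert model
                  ((pvMergeA (PySem.Dict.mk (comb.getD model []))
                      ((PySem.Dict.mk experiment).getD model [])).items))
            comb)
        PySem.Dict.empty)
      = (all_dicts.foldl
        (fun comb e =>
          e.foldl
            (fun c p =>
              if p.1 ∉ c.keys then c.insert p.1 p.2
              else c.insert p.1
                ((pvMergeA (PySem.Dict.mk (c.getD p.1 [])) p.2).items))
            comb)
        PySem.Dict.empty) := by
    apply PySem.List.foldl_congr_mem
    intro acc e he
    exact pvKeysFold_eq_pairsFold
      (fun c m v =>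
        if m ∉ c.keys then c.insert m v
        else c.insert m ((pvMergeA (PySem.Dict.mk (c.getD m [])) v).items))
      e acc ((h1 e he).1)
  rw [hA, ← List.foldl_flatten, ← List.foldl_flatten]
  have hstart :
      (PySem.Dict.empty : PySem.Dict String (List (String × List Int)))
        = pvCollapse PySem.Dict.empty := rfl
  rw [hstart,
    pvFold_commute all_dicts.flatten PySem.Dict.empty (by simp [PySem.Dict.keys_empty])
      (by intro w hw; simp [PySem.Dict.values, PySem.Dict.empty] at hw)]
  rw [pvFinalFold _ []
    (by
      intro pr hpr
      apply pvGroups_values_ne_nil all_dicts.flatten PySem.Dict.empty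
        (by intro w hw; simp [PySem.Dict.values, PySem.Dict.empty] at hw)
      simp only [PySem.Dict.values]
      exact List.mem_map.mpr ⟨pr, hpr, rfl⟩)]
  rfl
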